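-- pv_equiv track=rewrite | github.com/hojunking96/Daily-Algorithm-Study | 2023.02/02.07/GwangM/표현 가능한 이진트리.py | solution
-- ===== SOURCE A (Python) =====
-- def solve(li):
--   if len(li)==3:
--     return li[1]=='1' or li.count('1')==0
--   else:
--     le=len(li)
--     return li.count('1')==0 or (li[le//2]=='1' and solve(li[:le//2]) and solve(li[le//2+1:]))
--
-- def solution(numbers):
--     answer=[]
--     for i in numbers:
--      if i<=3:
--       answer.append(1)
--      else:
--       bi=bin(i)[2:]
--       le=len(bi)
--       sum=1
--       temp=2
--       while(sum<le):
--         sum+=temp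
--         temp*=2
--       li='0'*(sum-le)+bi
--       if solve(li):
--         answer.append(1)
--       else:
--         answer.append(0)
--
--     return answer
-- ===== SOURCE B (Python) =====
-- def _judge(n):
--     if n <= 3:
--         return 1
--     bi = format(n, 'b')
--     full = (1 << len(bi).bit_length()) - 1   # smallest 2**k - 1 >= len(bi)
--     li = bi.rjust(full, '0')
--     stack = [li]
--     while stack:
--         seg = stack.pop()
--         if '1' not in seg:
--             continue
--         if len(seg) == 3:
--             if seg[1] != '1':
--                 return 0
--         else:
--             m = len(seg) // 2
--             if seg[m] != '1':
--                 return 0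
--             stack.append(seg[:m])
--             stack.append(seg[m + 1:])
--     return 1
--
-- def solution(numbers):
--     return [_judge(n) for n in numbers]
-- ===== Notes on version B (the rewrite author's own statement) =====
-- stated objective: simpler
-- what changed: Replaces the recursive slice-and-count validity check with an iterative explicit-stack worklist scan with early return, and replaces the doubling while-loop that finds the padded length 2^k-1 with the closed form (1 << le.bit_length()) - 1.
import Mathlib
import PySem

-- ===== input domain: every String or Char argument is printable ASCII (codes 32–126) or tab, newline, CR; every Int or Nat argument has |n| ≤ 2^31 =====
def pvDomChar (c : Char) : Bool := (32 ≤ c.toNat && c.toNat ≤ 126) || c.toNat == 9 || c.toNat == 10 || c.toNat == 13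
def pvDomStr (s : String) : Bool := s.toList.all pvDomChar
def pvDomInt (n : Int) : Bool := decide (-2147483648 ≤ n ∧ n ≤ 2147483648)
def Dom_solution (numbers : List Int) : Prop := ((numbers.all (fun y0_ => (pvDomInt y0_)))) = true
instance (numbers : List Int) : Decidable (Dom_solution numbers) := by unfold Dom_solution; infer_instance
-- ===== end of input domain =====

-- B replaces A's recursive `solve` with an explicit-stack linear worklist scan and A's
-- doubling while-loop for the padded length with the closed form (1 << le.bit_length()) - 1;
-- objective: simpler (no recursion, no repeated count over sliced copies in the driver).

-- ===== PORT A =====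
-- bin(i)[2:] for a positive int: most-significant-bit-first binary digits (exact for n ≥ 1; both Pythons call this builtin)
def toBin (n : Nat) : List Char :=
  if n = 0 then [] else toBin (n / 2) ++ [if n % 2 = 1 then '1' else '0']

-- A's `sum=1; temp=2; while sum<le: sum+=temp; temp*=2`; the fuel only makes the loop total
-- (it is called with fuel = le, enough since sum grows by ≥ 2 every step)
def sumLoop (fuel sum temp le : Nat) : Nat :=
  match fuel with
  | 0 => sum
  | f + 1 => if sum < le then sumLoop f (sum + temp) (temp * 2) le else sum

-- A's recursive solve; Python's short-circuiting `or` becomes the if-then-else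
def solve (li : List Char) : Bool :=
  if li.length = 3 then
    (li[1]? == some '1') || (li.count '1' == 0)
  else
    if h : li.count '1' = 0 then true
    else ((li[li.length / 2]? == some '1') && solve (li.take (li.length / 2)))
           && solve (li.drop (li.length / 2 + 1))
termination_by li.length
decreasing_by
  all_goals
    have hne : li ≠ [] := fun e => h (by simp [e])
  all_goals
    have hp : 0 < li.length := List.length_pos_iff.mpr hne
  all_goals simp [List.length_take, List.length_drop]
  all_goals omega

def solution (numbers : List Int) : List Int :=
  numbers.foldl
    (fun answer i =>
      if i ≤ 3 then answer ++ [1]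
      else
        let bi := toBin i.toNat        -- i ≥ 4 here, so bin(i)[2:] is toBin i.toNat
        let le := bi.length
        let s := sumLoop le 1 2 le
        let li := List.replicate (s - le) '0' ++ bi
        if solve li then answer ++ [1] else answer ++ [0])
    []

-- ===== PORT B =====
-- int.bit_length
def bitLen (n : Nat) : Nat := if n = 0 then 0 else bitLen (n / 2) + 1

-- B's while-loop over the explicit stack (Python pops/pushes at the end; head of this list is the top)
def okLoop (stack : List (List Char)) : Int :=
  match stack with
  | [] => 1
  | seg :: rest =>
    if h0 : '1' ∈ seg then
      if seg.length = 3 then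
        if seg[1]? == some '1' then okLoop rest else 0
      else
        if seg[seg.length / 2]? == some '1' then
          okLoop (seg.drop (seg.length / 2 + 1) :: seg.take (seg.length / 2) :: rest)
        else 0
    else okLoop rest
termination_by (stack.map (fun s => 2 * s.length + 1)).sum
decreasing_by
  all_goals
    try have hp : 0 < seg.length := List.length_pos_iff.mpr (List.ne_nil_of_mem ‹'1' ∈ seg›)
  all_goals simp [List.length_take, List.length_drop]
  all_goals omega

def judge (n : Int) : Int :=
  if n ≤ 3 then 1
  else
    let bi := toBin n.toNat
    let full := (1 <<< bitLen bi.length) - 1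
    okLoop [List.replicate (full - bi.length) '0' ++ bi]   -- bi.rjust(full, '0')

def solution_alt (numbers : List Int) : List Int := numbers.map judge

-- ===== PRECONDITION & SPEC =====
def Spec_solution (numbers : List Int) (out : List Int) : Prop := out = solution_alt numbers
instance (numbers : List Int) (out : List Int) : Decidable (Spec_solution numbers out) := by unfold Spec_solution; infer_instance

-- ===== CLAIM (what is proved, stated in full; the proofs are below) =====
def Claim_equal_solution : Prop := ∀ (numbers : List Int), Dom_solution numbers → Spec_solution numbers (solution numbers)

-- ===== LEMMAS AND PROOFS =====

-- per-element value of A's loop body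
def gA (i : Int) : Int :=
  if i ≤ 3 then 1
  else
    let bi := toBin i.toNat
    let le := bi.length
    let s := sumLoop le 1 2 le
    if solve (List.replicate (s - le) '0' ++ bi) then 1 else 0

theorem foldl_step_map {α β : Type} (step : List β → α → List β) (f : α → β)
    (h : ∀ a x, step a x = a ++ [f x]) :
    ∀ (l : List α) (acc : List β), List.foldl step acc l = acc ++ l.map f := by
  intro l
  induction l with
  | nil => intro acc; simp
  | cons x xs ih => intro acc; simp [List.foldl_cons, h, ih]

theorem solution_eq_map (l : List Int) : solution l = l.map gA := by
  unfold solution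
  rw [foldl_step_map _ gA ?_ l []]
  · simp
  · intro a i
    by_cases h1 : i ≤ 3
    · simp [gA, h1]
    · simp only [gA, h1, if_false]
      split <;> rfl

theorem solve_count0 (li : List Char) (h : li.count '1' = 0) : solve li = true := by
  rw [solve]; split <;> simp [h]

theorem okLoop_eq_all : ∀ (stack : List (List Char)),
    okLoop stack = if stack.all solve then 1 else 0 := by
  intro stack
  induction stack using okLoop.induct with
  | case1 => simp [okLoop]
  | case2 seg rest h0 h3 hget ih =>
    rw [okLoop]; simp only [dif_pos h0, if_pos h3, if_pos hget, ih]
    have hs : solve seg = true := by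
      rw [solve, if_pos h3]
      simp only [hget, Bool.true_or]
    simp [List.all_cons, hs]
  | case3 seg rest h0 h3 hget =>
    rw [okLoop]; simp only [dif_pos h0, if_pos h3, hget]
    have hs : solve seg = false := by
      rw [solve, if_pos h3]
      simp [hget, List.count_eq_zero, h0]
    simp [List.all_cons, hs]
  | case4 seg rest h0 h3 hget ih =>
    rw [okLoop]; simp only [dif_pos h0, if_neg h3, if_pos hget, ih]
    have hc : ¬ seg.count '1' = 0 := by simpa [List.count_eq_zero] using h0
    have hs : solve seg
        = (solve (seg.take (seg.length / 2)) && solve (seg.drop (seg.length / 2 + 1))) := by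
      rw [solve, if_neg h3, dif_neg hc]
      simp [hget]
    cases hd : solve (seg.drop (seg.length / 2 + 1)) <;>
      cases ht : solve (seg.take (seg.length / 2)) <;>
      cases hr : rest.all solve <;>
      simp [List.all_cons, hs, hd, ht, hr]
  | case5 seg rest h0 h3 hget =>
    rw [okLoop]; simp only [dif_pos h0, if_neg h3, hget]
    have hc : ¬ seg.count '1' = 0 := by simpa [List.count_eq_zero] using h0
    have hs : solve seg = false := by
      rw [solve, if_neg h3, dif_neg hc]
      simp [hget]
    simp [List.all_cons, hs]
  | case6 seg rest h0 ih =>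
    rw [okLoop]; simp only [dif_neg h0, ih]
    have hc : seg.count '1' = 0 := by simpa [List.count_eq_zero] using h0
    simp [List.all_cons, solve_count0 seg hc]

theorem toBin_len_le : ∀ (k n : Nat), n < 2 ^ k → (toBin n).length ≤ k := by
  intro k
  induction k with
  | zero => intro n h; interval_cases n; simp [toBin]
  | succ k ih =>
    intro n h
    by_cases h0 : n = 0
    · simp [toBin, h0]
    · rw [toBin, if_neg h0]
      have h2 : 2 ^ (k + 1) = 2 ^ k * 2 := pow_succ 2 k
      have : n / 2 < 2 ^ k := by omega
      simpa using ih (n / 2) this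

theorem pad_eq : ∀ le, le < 33 → 1 ≤ le → sumLoop le 1 2 le = (1 <<< bitLen le) - 1 := by
  intro le h1 _
  interval_cases le <;> simp [sumLoop, bitLen]

theorem toBin_len_pos (n : Nat) (h : n ≠ 0) : 1 ≤ (toBin n).length := by
  rw [toBin, if_neg h]; simp

theorem elem_eq (i : Int) (h : pvDomInt i = true) : gA i = judge i := by
  by_cases h3 : i ≤ 3
  · simp [gA, judge, h3]
  · have hb : i ≤ 2147483648 := by
      simp only [pvDomInt, decide_eq_true_eq] at h; exact h.2
    have hlt : i.toNat < 2 ^ 32 := by omega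
    have hle : (toBin i.toNat).length ≤ 32 := toBin_len_le 32 _ hlt
    have hpos : 1 ≤ (toBin i.toNat).length := toBin_len_pos _ (by omega)
    have hpad := pad_eq (toBin i.toNat).length (by omega) hpos
    simp only [gA, judge, h3, if_false]
    rw [hpad, okLoop_eq_all]
    simp [List.all_cons]

-- ===== VERDICT (by name: the statement is the Claim_ definition above) =====
theorem solution_spec : Claim_equal_solution := by
  intro numbers hdom
  unfold Spec_solution solution_alt
  rw [solution_eq_map]
  unfold Dom_solution at hdom
  rw [List.all_eq_true] at hdom
  exact List.map_congr_left fun i hi => elem_eq i (hdom i hi)
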